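-- pv_equiv track=rewrite | github.com/Frankanator8/chesspoint72 | src/chesspoint72/engine/factory.py | _normalize_hce_modules
-- ===== SOURCE A (Python) =====
-- HCE_MODULE_GROUPS: dict[str, tuple[str, ...]] = {
--     "classic": (
--         "material", "pst", "pawns", "king_safety", "mobility", "rooks", "bishops",
--     ),
--     "advanced": ("ewpm", "srcm", "idam", "otvm", "lmdm", "lscm", "clcm", "desm"),
-- }
--
-- def _normalize_hce_modules(raw: str | None, available: set[str]) -> list[str]:
--     if raw is None or not raw.strip():
--         return list(HCE_MODULE_GROUPS["all"])
--
--     selected: list[str] = []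
--     seen: set[str] = set()
--     for token in (t.strip().lower() for t in raw.split(",")):
--         if not token:
--             continue
--         expanded = HCE_MODULE_GROUPS.get(token, (token,))
--         for name in expanded:
--             if name not in available:
--                 valid = ", ".join(sorted(available | set(HCE_MODULE_GROUPS)))
--                 raise ValueError(f"unknown hce module: {name!r}; valid values: {valid}")
--             if name in seen:
--                 continue
--             seen.add(name)
--             selected.append(name)
--
--     if not selected:
--         raise ValueError("no hce modules were selected")
--     return selected
-- ===== SOURCE B (Python) =====
-- HCE_MODULE_GROUPS: dict[str, tuple[str, ...]] = {
--     "classic": (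
--         "material", "pst", "pawns", "king_safety", "mobility", "rooks", "bishops",
--     ),
--     "advanced": ("ewpm", "srcm", "idam", "otvm", "lmdm", "lscm", "clcm", "desm"),
-- }
--
-- def _normalize_hce_modules(raw, available):
--     if raw is None or not raw.strip():
--         return list(HCE_MODULE_GROUPS["all"])
--
--     flat = []
--     for t in (t.strip().lower() for t in raw.split(",")):
--         if t:
--             flat.extend(HCE_MODULE_GROUPS.get(t, (t,)))
--
--     for name in flat:
--         if name not in available:
--             valid = ", ".join(sorted(available | set(HCE_MODULE_GROUPS)))
--             raise ValueError(f"unknown hce module: {name!r}; valid values: {valid}")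
--
--     selected = list(dict.fromkeys(flat))
--     if not selected:
--         raise ValueError("no hce modules were selected")
--     return selected
-- ===== Notes on version B (the rewrite author's own statement) =====
-- stated objective: idiomatic
-- what changed: Replaces the single fused loop that validates and dedupes with a seen-set while appending by three separate passes: flatten group expansion into one list, validate every name, then dedupe order-preservingly with dict.fromkeys.
import Mathlib
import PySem

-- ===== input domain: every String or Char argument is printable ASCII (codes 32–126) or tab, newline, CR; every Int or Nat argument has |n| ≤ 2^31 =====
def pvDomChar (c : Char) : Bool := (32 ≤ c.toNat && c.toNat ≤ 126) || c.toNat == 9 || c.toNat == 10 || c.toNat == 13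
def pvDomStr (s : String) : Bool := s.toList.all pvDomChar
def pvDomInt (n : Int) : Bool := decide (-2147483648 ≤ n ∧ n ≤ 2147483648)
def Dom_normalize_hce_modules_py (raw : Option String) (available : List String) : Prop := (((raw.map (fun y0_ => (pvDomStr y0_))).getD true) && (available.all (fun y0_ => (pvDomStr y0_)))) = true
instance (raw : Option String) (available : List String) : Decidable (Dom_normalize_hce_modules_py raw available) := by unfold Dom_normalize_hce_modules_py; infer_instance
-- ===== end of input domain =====

-- B re-decomposes A's single fused validate-and-dedupe loop into three passes (flatten, validate, dedupe);
-- the equivalence is about the RETURN value on inputs where A returns normally (Pre_ excludes A's raise paths).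

-- ===== PORT A =====
-- the module constant HCE_MODULE_GROUPS (tuples ported as lists)
def hceGroups : PySem.Dict String (List String) :=
  PySem.Dict.ofList
    [("classic", ["material", "pst", "pawns", "king_safety", "mobility", "rooks", "bishops"]),
     ("advanced", ["ewpm", "srcm", "idam", "otvm", "lmdm", "lscm", "clcm", "desm"])]

-- HCE_MODULE_GROUPS.get(token, (token,))
def hceExpand (token : String) : List String := hceGroups.getD token [token]

-- inner 'for name in expanded' loop over the state (selected, seen); none = the ValueError raise on an unknown name
def hceAInner (available : List String) :
    List String → List String × PySem.Set String → Option (List String × PySem.Set String)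
  | [], st => some st
  | name :: rest, (selected, seen) =>
      if name ∈ available then
        if PySem.Set.contains seen name then hceAInner available rest (selected, seen)
        else hceAInner available rest (selected ++ [name], PySem.Set.add seen name)
      else none

-- outer 'for token in (t.strip().lower() for t in raw.split(","))' loop
def hceALoop (available : List String) :
    List String → List String × PySem.Set String → Option (List String × PySem.Set String)
  | [], st => some st
  | tok :: rest, st =>
      let token := PySem.Str.lower (PySem.Str.strip tok)
      if token = "" then hceALoop available rest st
      else
        match hceAInner available (hceExpand token) st with
        | none => none
        | some st' => hceALoop available rest st'

def normalize_hce_modules_py (raw : Option String) (available : List String) : List String :=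
  match raw with
  | none => []                                    -- Python: KeyError on HCE_MODULE_GROUPS["all"] (excluded by Pre_)
  | some s =>
      if PySem.Str.strip s = "" then []           -- Python: the same KeyError (excluded by Pre_)
      else
        match hceALoop available ((PySem.Str.split? s ",").getD []) ([], PySem.Set.empty) with
        | none => []                              -- Python: ValueError "unknown hce module" (excluded by Pre_)
        | some (selected, _) =>
            if selected = [] then []              -- Python: ValueError "no hce modules were selected" (excluded by Pre_)
            else selected

-- ===== PORT B =====
-- t.strip().lower() for one token
def hceTok (tok : String) : String := PySem.Str.lower (PySem.Str.strip tok)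

def normalize_hce_modules_py_alt (raw : Option String) (available : List String) : List String :=
  match raw with
  | none => []                                    -- Python B: the same KeyError (excluded by Pre_)
  | some s =>
      if PySem.Str.strip s = "" then []
      else
        let flat := ((PySem.Str.split? s ",").getD []).foldl
          (fun acc tok => let t := hceTok tok; if t = "" then acc else acc ++ hceExpand t) []
        if flat.any (fun name => !(available.contains name)) then []  -- Python B: ValueError (excluded by Pre_)
        else
          let selected := PySem.List.dedup flat   -- list(dict.fromkeys(flat))
          if selected = [] then [] else selected  -- Python B: ValueError (excluded by Pre_)

-- ===== PRECONDITION & SPEC =====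
-- Pre_ holds exactly where the Python A returns normally: raw is a non-blank string, every expanded
-- module name of every non-empty token is available, and at least one token is non-empty
-- (on everything else A raises KeyError or ValueError, and so does B).
def Pre_normalize_hce_modules_py (raw : Option String) (available : List String) : Prop :=
  (raw.map (fun s =>
      (PySem.Str.strip s != "") &&
      ((PySem.Str.split? s ",").getD []).all (fun tok =>
        (hceTok tok == "") || (hceExpand (hceTok tok)).all (fun name => available.contains name)) &&
      ((PySem.Str.split? s ",").getD []).any (fun tok => hceTok tok != ""))).getD false = true
instance (raw : Option String) (available : List String) : Decidable (Pre_normalize_hce_modules_py raw available) := by unfold Pre_normalize_hce_modules_py; infer_instance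

def pvWitness_normalize_hce_modules_py : Option String × List String :=
  (some "classic, ewpm, Pst",
   ["material", "pst", "pawns", "king_safety", "mobility", "rooks", "bishops", "ewpm"])

def Spec_normalize_hce_modules_py (raw : Option String) (available : List String) (out : List String) : Prop := out = normalize_hce_modules_py_alt raw available
instance (raw : Option String) (available : List String) (out : List String) : Decidable (Spec_normalize_hce_modules_py raw available out) := by unfold Spec_normalize_hce_modules_py; infer_instance

-- ===== CLAIM (what is proved, stated in full; the proofs are below) =====
def Claim_equal_normalize_hce_modules_py : Prop := ∀ (raw : Option String) (available : List String), Dom_normalize_hce_modules_py raw available → Pre_normalize_hce_modules_py raw available → Spec_normalize_hce_modules_py raw available (normalize_hce_modules_py raw available)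

-- ===== LEMMAS AND PROOFS =====

-- what one token contributes to B's flat list
def hceG (tok : String) : List String :=
  if hceTok tok = "" then [] else hceExpand (hceTok tok)

-- A's inner loop keeps 'seen' equal (as a list) to 'selected'; on such a coupled state it is
-- 'fold Set.add' when every name is available, and the raise (none) otherwise.
theorem hceAInner_eq (available : List String) (names : List String) (l : List String) :
    hceAInner available names (l, l) =
      (if names.all (fun n => available.contains n) then
        some (names.foldl PySem.Set.add l, names.foldl PySem.Set.add l)
      else none) := by
  induction names generalizing l with
  | nil => simp [hceAInner]
  | cons name rest ih =>
      rw [hceAInner, List.all_cons, List.foldl_cons]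
      by_cases h : name ∈ available
      · have hc : available.contains name = true := by simpa using h
        rw [if_pos h, hc, Bool.true_and]
        by_cases hs : PySem.Set.contains l name = true
        · have hadd : PySem.Set.add l name = l := by
            rw [PySem.Set.add, if_pos hs]
          rw [if_pos hs, ih l, hadd]
        · have hadd : PySem.Set.add l name = l ++ [name] := by
            rw [PySem.Set.add, if_neg hs]
          rw [if_neg hs, ← hadd, ih (PySem.Set.add l name)]
      · have hc : available.contains name = false := by simpa using h
        rw [if_neg h, hc, Bool.false_and, if_neg (by simp)]

-- A's outer loop on a coupled state is 'fold Set.add' over the flattened expansion,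
-- guarded by availability of every flattened name.
theorem hceALoop_eq (available : List String) (toks : List String) (l : List String) :
    hceALoop available toks (l, l) =
      (if (toks.flatMap hceG).all (fun n => available.contains n) then
        some ((toks.flatMap hceG).foldl PySem.Set.add l,
              (toks.flatMap hceG).foldl PySem.Set.add l)
      else none) := by
  induction toks generalizing l with
  | nil => simp [hceALoop]
  | cons tok rest ih =>
      rw [hceALoop, List.flatMap_cons]
      rw [show PySem.Str.lower (PySem.Str.strip tok) = hceTok tok from rfl]
      by_cases ht : hceTok tok = ""
      · rw [if_pos ht, ih l, show hceG tok = [] from by rw [hceG, if_pos ht], List.nil_append]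
      · rw [if_neg ht, hceAInner_eq,
            show hceG tok = hceExpand (hceTok tok) from by rw [hceG, if_neg ht],
            List.all_append, List.foldl_append]
        by_cases hall : (hceExpand (hceTok tok)).all (fun n => available.contains n) = true
        · rw [if_pos hall, hall, Bool.true_and]
          exact ih (List.foldl PySem.Set.add l (hceExpand (hceTok tok)))
        · have hf : (hceExpand (hceTok tok)).all (fun n => available.contains n) = false := by
            simpa using hall
          rw [if_neg hall, hf, Bool.false_and, if_neg (by simp)]

-- B's flattening fold is the flatMap of the per-token contribution
theorem hceFlat_eq (toks : List String) :
    toks.foldl (fun acc tok => if hceTok tok = "" then acc else acc ++ hceExpand (hceTok tok)) [] =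
      toks.flatMap hceG := by
  rw [show (fun (acc : List String) (tok : String) =>
        if hceTok tok = "" then acc else acc ++ hceExpand (hceTok tok)) =
      (fun acc tok => acc ++ hceG tok) from ?_]
  · rw [PySem.List.foldl_append_eq_flatMap, List.nil_append]
  · funext acc tok
    rw [hceG]
    by_cases h : hceTok tok = "" <;> simp [h]

theorem normalize_hce_modules_py_eq_alt (raw : Option String) (available : List String) :
    normalize_hce_modules_py raw available = normalize_hce_modules_py_alt raw available := by
  cases raw with
  | none => rfl
  | some s =>
      simp only [normalize_hce_modules_py, normalize_hce_modules_py_alt]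
      by_cases hs : PySem.Str.strip s = ""
      · simp [hs]
      · rw [if_neg hs, if_neg hs,
            show (PySem.Set.empty : PySem.Set String) = ([] : List String) from rfl,
            hceALoop_eq, hceFlat_eq]
        set flat := ((PySem.Str.split? s ",").getD []).flatMap hceG with hfdef
        by_cases hall : flat.all (fun n => available.contains n) = true
        · rw [if_pos hall]
          have hany : (flat.any fun name => !available.contains name) = false := by
            rw [List.any_eq_false]
            intro n hn
            have hc := List.all_eq_true.mp hall n hn
            simp only [hc, Bool.not_true, Bool.false_eq_true, not_false_eq_true]
          rw [hany, if_neg (by simp),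
              PySem.List.dedup_eq_ofList, PySem.Set.ofList_eq_foldl]
        · have hf : flat.all (fun n => available.contains n) = false := by simpa using hall
          obtain ⟨n, hn, hcn⟩ := by
            have := (List.all_eq_false).mp hf
            simpa using this
          have hany : (flat.any fun name => !available.contains name) = true := by
            rw [List.any_eq_true]
            exact ⟨n, hn, by simp [hcn]⟩
          rw [if_neg hall, hany, if_pos rfl]

-- ===== VERDICT (by name: the statement is the Claim_ definition above) =====
theorem normalize_hce_modules_py_spec : Claim_equal_normalize_hce_modules_py := by
  intro raw available _ _
  unfold Spec_normalize_hce_modules_py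
  exact normalize_hce_modules_py_eq_alt raw available
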